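-- pv_equiv track=rewrite | github.com/Peepow2/ComProgYear1 | 2110101_2-2023/Homework/5.py | get_common_sports
-- ===== SOURCE A (Python) =====
-- def get_sports(athletes_by_Year_NOC, NOC, year):
--   sports = set()
--   if year in athletes_by_Year_NOC:
--     if NOC in athletes_by_Year_NOC[year]:
--       for d in athletes_by_Year_NOC[year][NOC]:
--         if d['Medal'] != 'NA':
--           sports.add(d['Sport'])
--   return sports
--
-- def get_common_sports(athletes_by_Year_NOC, NOCs, year):
--   sports = set()
--   NOCS = list(NOCs)
--   if len(NOCS) > 0:
--     sports = get_sports(athletes_by_Year_NOC, NOCS[0], year)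
--     for N in NOCS:
--       sports = sports & get_sports(athletes_by_Year_NOC, N, year)
--   return sports
-- ===== SOURCE B (Python) =====
-- def _medal_sports(athletes_by_Year_NOC, NOC, year):
--   group = athletes_by_Year_NOC.get(year, {}).get(NOC, [])
--   return {d['Sport'] for d in group if d['Medal'] != 'NA'}
--
-- def get_common_sports(athletes_by_Year_NOC, NOCs, year):
--   distinct = list(dict.fromkeys(NOCs))
--   tally = {}
--   for N in distinct:
--     for s in _medal_sports(athletes_by_Year_NOC, N, year):
--       tally[s] = tally.get(s, 0) + 1
--   return {s for s, c in tally.items() if c == len(distinct)}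
-- ===== Notes on version B (the rewrite author's own statement) =====
-- stated objective: alternative
-- what changed: Replaces the running set-intersection over NOCs by a single count-and-filter pass: NOCs are deduplicated, a counter tallies for each distinct NOC its distinct medal-winning sports, and the result is the sports whose tally equals the number of distinct NOCs.
import Mathlib
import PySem

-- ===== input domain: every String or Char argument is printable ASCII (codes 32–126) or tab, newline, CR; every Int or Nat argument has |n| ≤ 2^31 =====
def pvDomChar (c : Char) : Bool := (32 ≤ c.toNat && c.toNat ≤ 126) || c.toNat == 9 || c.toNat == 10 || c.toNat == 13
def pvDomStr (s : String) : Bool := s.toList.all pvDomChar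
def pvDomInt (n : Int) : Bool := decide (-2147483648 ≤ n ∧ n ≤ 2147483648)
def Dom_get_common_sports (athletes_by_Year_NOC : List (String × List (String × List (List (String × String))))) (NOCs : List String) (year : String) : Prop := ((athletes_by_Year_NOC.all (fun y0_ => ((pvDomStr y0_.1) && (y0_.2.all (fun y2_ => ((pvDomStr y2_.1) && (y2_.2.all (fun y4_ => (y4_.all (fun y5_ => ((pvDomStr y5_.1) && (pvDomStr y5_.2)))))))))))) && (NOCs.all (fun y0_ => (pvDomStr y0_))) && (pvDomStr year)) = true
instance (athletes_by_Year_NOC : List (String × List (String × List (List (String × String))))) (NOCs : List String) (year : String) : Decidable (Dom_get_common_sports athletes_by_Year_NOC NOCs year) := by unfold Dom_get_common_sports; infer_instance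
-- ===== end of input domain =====

-- B replaces A's running set-intersection by a dedup + count-and-filter pass (objective: alternative).

-- ===== PORT A =====
-- port of helper get_sports: the 'year in'/'NOC in' membership tests become the none-branches of get?;
-- d['Medal'] / d['Sport'] are ported with getD (exact under Pre_, which guarantees the keys are present).
def pv_get_sports (athletes_by_Year_NOC : List (String × List (String × List (List (String × String))))) (NOC : String) (year : String) : PySem.Set String :=
  match (PySem.Dict.mk athletes_by_Year_NOC).get? year with
  | none => PySem.Set.empty
  | some m =>
    match (PySem.Dict.mk m).get? NOC with
    | none => PySem.Set.empty
    | some lst =>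
      lst.foldl (fun sports d =>
        if (PySem.Dict.mk d).getD "Medal" "" != "NA" then
          PySem.Set.add sports ((PySem.Dict.mk d).getD "Sport" "")
        else sports) PySem.Set.empty

def get_common_sports (athletes_by_Year_NOC : List (String × List (String × List (List (String × String))))) (NOCs : List String) (year : String) : List String :=
  let sports : PySem.Set String := PySem.Set.empty
  if 0 < NOCs.length then
    -- NOCS[0]: exact under the guard 0 < len
    let sports := pv_get_sports athletes_by_Year_NOC ((PySem.List.pyGet? NOCs 0).getD "") year
    NOCs.foldl (fun sports N => PySem.Set.inter sports (pv_get_sports athletes_by_Year_NOC N year)) sports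
  else sports

-- ===== PORT B =====
-- port of helper _medal_sports: chained .get defaults, then a set comprehension over the filtered records
def pv_medal_sports (athletes_by_Year_NOC : List (String × List (String × List (List (String × String))))) (NOC : String) (year : String) : PySem.Set String :=
  let group := (PySem.Dict.mk ((PySem.Dict.mk athletes_by_Year_NOC).getD year [])).getD NOC []
  PySem.Set.ofList ((group.filter (fun d => (PySem.Dict.mk d).getD "Medal" "" != "NA")).map
    (fun d => (PySem.Dict.mk d).getD "Sport" ""))

def get_common_sports_alt (athletes_by_Year_NOC : List (String × List (String × List (List (String × String))))) (NOCs : List String) (year : String) : List String :=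
  let distinct := PySem.List.dedup NOCs
  let tally : PySem.Dict String Int := distinct.foldl (fun t N =>
      (pv_medal_sports athletes_by_Year_NOC N year).foldl (fun t s => t.modify s 0 (· + 1)) t)
    PySem.Dict.empty
  ((tally.items.filter (fun p => p.2 == (distinct.length : Int))).map (·.1))

-- ===== PRECONDITION & SPEC =====
-- Pre_ excludes exactly the inputs where Python A raises KeyError: a record reached through
-- (year, some NOC of NOCs) that lacks the 'Medal' key, or lacks the 'Sport' key while its medal ≠ 'NA'.
def pvRecOk (d : List (String × String)) : Bool :=
  match (PySem.Dict.mk d).get? "Medal" with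
  | none => false
  | some md => md == "NA" || ((PySem.Dict.mk d).get? "Sport").isSome

def Pre_get_common_sports (athletes_by_Year_NOC : List (String × List (String × List (List (String × String))))) (NOCs : List String) (year : String) : Prop :=
  NOCs = [] ∨
    (match (PySem.Dict.mk athletes_by_Year_NOC).get? year with
     | none => true
     | some m => NOCs.all (fun N =>
         match (PySem.Dict.mk m).get? N with
         | none => true
         | some lst => lst.all pvRecOk)) = true

instance (athletes_by_Year_NOC : List (String × List (String × List (List (String × String))))) (NOCs : List String) (year : String) : Decidable (Pre_get_common_sports athletes_by_Year_NOC NOCs year) := by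
  unfold Pre_get_common_sports; infer_instance

def pvWitness_get_common_sports : (List (String × List (String × List (List (String × String))))) × List String × String :=
  ([("2000", [("USA", [[("Medal", "Gold"), ("Sport", "Judo")], [("Medal", "NA")]]), ("FRA", [[("Medal", "Silver"), ("Sport", "Judo")]])])],
   ["USA", "FRA"], "2000")

def Spec_get_common_sports (athletes_by_Year_NOC : List (String × List (String × List (List (String × String))))) (NOCs : List String) (year : String) (out : List String) : Prop := out = get_common_sports_alt athletes_by_Year_NOC NOCs year
instance (athletes_by_Year_NOC : List (String × List (String × List (List (String × String))))) (NOCs : List String) (year : String) (out : List String) : Decidable (Spec_get_common_sports athletes_by_Year_NOC NOCs year out) := by unfold Spec_get_common_sports; infer_instance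

-- ===== CLAIM (what is proved, stated in full; the proofs are below) =====
def Claim_equal_get_common_sports : Prop := ∀ (athletes_by_Year_NOC : List (String × List (String × List (List (String × String))))) (NOCs : List String) (year : String), Dom_get_common_sports athletes_by_Year_NOC NOCs year → Pre_get_common_sports athletes_by_Year_NOC NOCs year → Spec_get_common_sports athletes_by_Year_NOC NOCs year (get_common_sports athletes_by_Year_NOC NOCs year)

-- ===== LEMMAS AND PROOFS =====

-- the two helper ports compute the same list
theorem sports_eq (ab : List (String × List (String × List (List (String × String))))) (N year : String) :
    pv_get_sports ab N year = pv_medal_sports ab N year := by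
  unfold pv_get_sports pv_medal_sports
  simp only [PySem.Dict.getD_eq_get?_getD]
  rcases hy : (PySem.Dict.mk ab).get? year with _ | m
  · simp only [Option.getD_none]; rfl
  · simp only [Option.getD_some]
    rcases hn : (PySem.Dict.mk m).get? N with _ | lst
    · simp only [Option.getD_none]; rfl
    · simp only [Option.getD_some]
      rw [← List.foldl_filter, ← PySem.Set.update_map_eq_foldl_add, PySem.Set.update_empty]

theorem medal_nodup (ab : List (String × List (String × List (List (String × String))))) (N year : String) :
    (pv_medal_sports ab N year).Nodup := by
  unfold pv_medal_sports
  exact PySem.Set.nodup_ofList _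

-- A's loop of running intersections is one filter over its initial set
theorem foldl_inter (g : String → List String) (Ns : List String) :
    ∀ (init : List String),
      Ns.foldl (fun s N => PySem.Set.inter s (g N)) init
        = init.filter (fun x => Ns.all (fun N => (g N).contains x)) := by
  induction Ns with
  | nil => intro init; simp
  | cons N Ns ih =>
    intro init
    rw [List.foldl_cons, ih]
    simp only [PySem.Set.inter, List.filter_filter, List.all_cons]
    exact List.filter_congr (fun a _ => Bool.and_comm _ _)

-- counting occurrences in a flatMap of nodup lists counts the lists that contain the element
theorem count_flatMap_nodup (g : String → List String) (hnd : ∀ N, (g N).Nodup)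
    (Ns : List String) (x : String) :
    ((Ns.flatMap g).count x) = Ns.countP (fun N => (g N).contains x) := by
  induction Ns with
  | nil => rfl
  | cons N Ns ih =>
    simp only [List.flatMap_cons, List.count_append, List.countP_cons, ih]
    by_cases h : x ∈ g N
    · rw [List.count_eq_one_of_mem (hnd N) h]
      simp [h]
      omega
    · rw [List.count_eq_zero_of_not_mem h]
      simp [h]

-- B computes: filter the first-occurrence list of all tallied sports by "tally = number of distinct NOCs"
theorem alt_eq_filter (ab : List (String × List (String × List (List (String × String))))) (NOCs : List String) (year : String) :
    get_common_sports_alt ab NOCs year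
      = (PySem.Set.ofList ((PySem.List.dedup NOCs).flatMap (fun N => pv_medal_sports ab N year))).filter
          (fun x => ((((PySem.List.dedup NOCs).flatMap (fun N => pv_medal_sports ab N year)).count x : Int)
                      == ((PySem.List.dedup NOCs).length : Int))) := by
  unfold get_common_sports_alt
  dsimp only
  rw [← List.foldl_flatMap, ← PySem.Dict.counter_eq_foldl, PySem.Dict.items_counter,
    List.filter_map, List.map_map]
  simp only [Function.comp_def]
  rw [List.map_id']

theorem get_common_sports_spec : Claim_equal_get_common_sports := by
  intro ab NOCs year _ _
  unfold Spec_get_common_sports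
  cases NOCs with
  | nil => rfl
  | cons N0 tail =>
    rw [alt_eq_filter]
    unfold get_common_sports
    simp only [sports_eq, List.length_cons, Nat.zero_lt_succ, if_true]
    have hg0 : (PySem.List.pyGet? (N0 :: tail) 0).getD "" = N0 := by
      simp [PySem.List.pyGet?, PySem.List.pyIdx?]
    rw [hg0, foldl_inter]
    have hnd : ∀ N, (pv_medal_sports ab N year).Nodup := fun N => medal_nodup ab N year
    -- the two filter predicates agree pointwise
    have hQP : ∀ x : String,
        ((((PySem.List.dedup (N0 :: tail)).flatMap (fun N => pv_medal_sports ab N year)).count x : Int)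
            == ((PySem.List.dedup (N0 :: tail)).length : Int))
          = (N0 :: tail).all (fun N => (pv_medal_sports ab N year).contains x) := by
      intro x
      rw [Bool.eq_iff_iff, beq_iff_eq, Nat.cast_inj, count_flatMap_nodup _ hnd,
        List.countP_eq_length, List.all_eq_true]
      constructor
      · intro h N hN; exact h N ((PySem.List.mem_dedup _ _).2 hN)
      · intro h N hN; exact h N ((PySem.List.mem_dedup _ _).1 hN)
    rw [List.filter_congr (fun x _ => hQP x)]
    -- first-occurrence order: the common sports all sit in the first NOC's set
    rw [PySem.List.dedup_eq_ofList, PySem.Set.ofList_cons, List.flatMap_cons,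
      PySem.Set.ofList_append, PySem.Set.ofList_eq_self_of_nodup _ (hnd N0),
      PySem.Set.update_eq_append_filter, List.filter_append]
    have hextra : List.filter (fun x => (N0 :: tail).all fun N => (pv_medal_sports ab N year).contains x)
        (List.filter (fun y => !(pv_medal_sports ab N0 year).contains y)
          (PySem.Set.ofList (((PySem.Set.ofList tail).discard N0).flatMap (fun N => pv_medal_sports ab N year)))) = [] := by
      rw [List.filter_eq_nil_iff]
      intro y hy hP
      have hf := (List.mem_filter.1 hy).2
      simp only [Bool.not_eq_true'] at hf
      have hc := ((List.all_eq_true).1 hP) N0 (by simp)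
      cases hc.symm.trans hf
    rw [hextra, List.append_nil]
    rfl
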